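-- pv_equiv track=rewrite | github.com/annyoon/ps | Python3/프로그래머스/1/389478. 택배 상자 꺼내기/택배 상자 꺼내기.py | solution
-- ===== SOURCE A (Python) =====
-- def solution(n, w, num):
--     total, find = [], []
--     box, reverse = 1, False
--     floor = n // w if n % w == 0 else n // w + 1
--
--     for i in range(floor):
--         arr = []
--         for j in range(w):
--             if box == num:
--                 if reverse:
--                     find = [i, w - j - 1]
--                 else:
--                     find = [i, j]
--             arr.append(box)
--             box += 1
--         if reverse:
--             total.append(arr[::-1])
--             reverse = False
--         else:
--             total.append(arr)
--             reverse = True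
--
--     answer = floor - find[0]
--     if total[floor - 1][find[1]] > n:
--         answer -= 1
--
--     return answer
-- ===== SOURCE B (Python) =====
-- def solution(n, w, num):
--     if n < 1 or w < 1:
--         raise ValueError("need n >= 1 boxes stacked in columns of width w >= 1")
--     floor = -(-n // w)
--     row, j = divmod(num - 1, w)
--     col = j if row % 2 == 0 else w - 1 - j
--     top_j = col if (floor - 1) % 2 == 0 else w - 1 - col
--     ans = floor - row
--     if (floor - 1) * w + top_j + 1 > n:
--         ans -= 1
--     return ans
-- ===== Notes on version B (the rewrite author's own statement) =====
-- stated objective: faster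
-- what changed: B replaces A's O(n) simulation (building every row of the boustrophedon stack while scanning for the box) with O(1) closed-form arithmetic: row/column of num via divmod and parity, and the top box of that column via the parity of the last row.
import Mathlib
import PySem

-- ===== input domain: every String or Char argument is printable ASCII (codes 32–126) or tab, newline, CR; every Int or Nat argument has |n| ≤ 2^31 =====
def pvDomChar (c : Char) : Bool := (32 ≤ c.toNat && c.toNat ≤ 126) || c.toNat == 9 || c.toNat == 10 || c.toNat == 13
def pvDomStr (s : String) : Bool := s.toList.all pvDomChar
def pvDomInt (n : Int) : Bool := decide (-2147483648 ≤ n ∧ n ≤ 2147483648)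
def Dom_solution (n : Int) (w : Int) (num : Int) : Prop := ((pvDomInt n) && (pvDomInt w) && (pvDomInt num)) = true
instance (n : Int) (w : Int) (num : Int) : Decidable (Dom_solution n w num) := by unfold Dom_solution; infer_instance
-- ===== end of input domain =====

-- B replaces A's O(n) row-by-row simulation by O(1) closed-form arithmetic (objective: faster).

-- ===== PORT A =====
-- inner 'for j in range(w)' body; state (arr, find, box)
def solutionInnerStep (num w i : Int) (rev : Bool)
    (s : List Int × List Int × Int) (j : Int) : List Int × List Int × Int :=
  let find := if s.2.2 == num then (if rev then [i, w - j - 1] else [i, j]) else s.2.1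
  (s.1 ++ [s.2.2], find, s.2.2 + 1)

-- outer 'for i in range(floor)' body; state (total, find, box, reverse)
def solutionOuterStep (num w : Int)
    (st : List (List Int) × List Int × Int × Bool) (i : Int) :
    List (List Int) × List Int × Int × Bool :=
  let inner := (PySem.List.pyRange 0 w 1).foldl (solutionInnerStep num w i st.2.2.2) ([], st.2.1, st.2.2.1)
  if st.2.2.2 then
    (st.1 ++ [(PySem.List.slice? inner.1 none none (-1)).getD []], inner.2.1, inner.2.2, false)
  else
    (st.1 ++ [inner.1], inner.2.1, inner.2.2, true)

def solution (n : Int) (w : Int) (num : Int) : Int :=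
  let floor : Int :=
    if PySem.Int.mod n w == 0 then PySem.Int.floordiv n w else PySem.Int.floordiv n w + 1
  let st := (PySem.List.pyRange 0 floor 1).foldl (solutionOuterStep num w) ([], [], 1, false)
  let total := st.1
  let find := st.2.1
  let answer := floor - PySem.List.pyGetD find 0 0
  if PySem.List.pyGetD (PySem.List.pyGetD total (floor - 1) []) (PySem.List.pyGetD find 1 0) 0 > n then
    answer - 1
  else
    answer

-- ===== PORT B =====
def solution_alt (n : Int) (w : Int) (num : Int) : Int :=
  if n < 1 ∨ w < 1 then 0   -- the Python raises ValueError here (outside Pre_); the port returns 0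
  else
  let floor : Int := -(PySem.Int.floordiv (-n) w)
  let row := PySem.Int.floordiv (num - 1) w
  let j := PySem.Int.mod (num - 1) w
  let col := if PySem.Int.mod row 2 == 0 then j else w - 1 - j
  let top_j := if PySem.Int.mod (floor - 1) 2 == 0 then col else w - 1 - col
  let ans := floor - row
  if (floor - 1) * w + top_j + 1 > n then ans - 1 else ans

-- ===== PRECONDITION & SPEC =====
-- Pre_ excludes exactly the inputs where A raises: w ≤ 0 (ZeroDivisionError or empty ranges),
-- n ≤ 0 (no rows are built), and num outside the built boxes 1..ceil(n/w)*w (find stays [] → IndexError).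
def Pre_solution (n : Int) (w : Int) (num : Int) : Prop :=
  1 ≤ w ∧ 1 ≤ n ∧ 1 ≤ num ∧ num ≤ w * ((n + w - 1) / w)
instance (n : Int) (w : Int) (num : Int) : Decidable (Pre_solution n w num) := by
  unfold Pre_solution; infer_instance

def pvWitness_solution : Int × Int × Int := (13, 3, 7)

def Spec_solution (n : Int) (w : Int) (num : Int) (out : Int) : Prop := out = solution_alt n w num
instance (n : Int) (w : Int) (num : Int) (out : Int) : Decidable (Spec_solution n w num out) := by
  unfold Spec_solution; infer_instance

-- ===== CLAIM (what is proved, stated in full; the proofs are below) =====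
def Claim_equal_solution : Prop := ∀ (n : Int) (w : Int) (num : Int), Dom_solution n w num → Pre_solution n w num → Spec_solution n w num (solution n w num)


-- ===== LEMMAS AND PROOFS =====

-- Euclidean division characterisation (used to identify rows and the ceiling)
theorem pv_ediv_eq (a b q r : Int) (h0 : 0 ≤ r) (h1 : r < b) (h3 : a = b * q + r) : a / b = q :=
  ((Int.ediv_emod_unique (lt_of_le_of_lt h0 h1)).mpr ⟨by omega, h0, h1⟩).1

-- the values 1..w of row r, in natural order
def rowVals (w : Int) (r : Nat) : List Int :=
  (PySem.List.pyRange 0 w 1).map (fun j => (r : Int) * w + 1 + j)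

-- the row as A stores it in `total` (odd rows reversed)
def storedRow (w : Int) (r : Nat) : List Int :=
  if r % 2 = 0 then rowVals w r else (rowVals w r).reverse

-- the `find` pair A ends with, in closed form
def findVal (w num : Int) : List Int :=
  [(num - 1) / w,
   if (num - 1) / w % 2 = 0 then (num - 1) % w else w - 1 - (num - 1) % w]

theorem inner_fold (num w i : Int) (rev : Bool) (a0 f0 : List Int) (b0 : Int) (m : Nat) :
    (PySem.List.pyRange 0 (m : Int) 1).foldl (solutionInnerStep num w i rev) (a0, f0, b0)
    = (a0 ++ (List.range m).map (fun t => b0 + (t : Int)),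
       if b0 ≤ num ∧ num < b0 + (m : Int)
         then [i, if rev then w - (num - b0) - 1 else num - b0] else f0,
       b0 + (m : Int)) := by
  induction m with
  | zero =>
      rw [PySem.List.pyRange_one_eq_nil (by simp)]
      simp
  | succ m ih =>
      have hc : ((m + 1 : Nat) : Int) = (m : Int) + 1 := by push_cast; ring
      rw [hc, PySem.List.pyRange_one_succ_right (by positivity), List.foldl_append, ih]
      simp only [List.foldl_cons, List.foldl_nil, solutionInnerStep, List.range_succ]
      simp only [Prod.mk.injEq]
      refine ⟨by simp, ?_, by ring⟩
      by_cases hb : b0 + (m : Int) = num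
      · have hnb : num - b0 = (m : Int) := by omega
        rw [if_pos (by simpa using hb),
            if_pos (show b0 ≤ num ∧ num < b0 + ((m : Int) + 1) by omega)]
        cases rev <;> simp [hnb]
      · rw [if_neg (by simpa using hb)]
        by_cases h2 : b0 ≤ num ∧ num < b0 + (m : Int)
        · rw [if_pos h2,
              if_pos (show b0 ≤ num ∧ num < b0 + ((m : Int) + 1) by omega)]
        · rw [if_neg h2,
              if_neg (show ¬(b0 ≤ num ∧ num < b0 + ((m : Int) + 1)) by omega)]

theorem pv_flatMap_singleton {α β : Type} (f : α → β) (l : List α) :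
    List.flatMap (fun a => [f a]) l = l.map f := by
  induction l with
  | nil => rfl
  | cons a l ih => simp [List.flatMap_cons, ih]

theorem rowVals_eq (W : Nat) (r : Nat) :
    rowVals (W : Int) r = (List.range W).map (fun t => (r : Int) * W + 1 + (t : Int)) := by
  simp [rowVals, PySem.List.pyRange_one, List.map_map]
  rw [pv_flatMap_singleton, ← List.map_map]

theorem find_step (num : Int) (W k : Nat) (hW : 1 ≤ W) :
    (if (k : Int) * (W : Int) + 1 ≤ num ∧ num < (k : Int) * (W : Int) + 1 + (W : Int) then
       [(k : Int), if decide (k % 2 = 1) = true then (W : Int) - (num - ((k : Int) * (W : Int) + 1)) - 1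
                   else num - ((k : Int) * (W : Int) + 1)]
     else if 1 ≤ num ∧ num ≤ (k : Int) * (W : Int) then findVal (W : Int) num else [])
    = if 1 ≤ num ∧ num ≤ ((k : Int) + 1) * (W : Int) then findVal (W : Int) num else [] := by
  have ht : ((k : Int) + 1) * (W : Int) = (k : Int) * (W : Int) + (W : Int) := by ring
  have hWpos : (0 : Int) < (W : Int) := by exact_mod_cast hW
  have hkW : (0 : Int) ≤ (k : Int) * (W : Int) := by positivity
  by_cases h1 : (k : Int) * (W : Int) + 1 ≤ num ∧ num < (k : Int) * (W : Int) + 1 + (W : Int)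
  · rw [if_pos h1, if_pos (show 1 ≤ num ∧ num ≤ ((k : Int) + 1) * (W : Int) by
      constructor <;> linarith [h1.1, h1.2])]
    have hdiv : (num - 1) / (W : Int) = (k : Int) :=
      pv_ediv_eq _ _ _ (num - 1 - (k : Int) * (W : Int))
        (by linarith [h1.1]) (by linarith [h1.2]) (by ring)
    have hmod : (num - 1) % (W : Int) = num - 1 - (k : Int) * (W : Int) := by
      rw [Int.emod_def, hdiv]; ring
    by_cases hk : k % 2 = 0
    · have hki : (k : Int) % 2 = 0 := by omega
      simp [findVal, hdiv, hmod, hk, hki]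
      ring
    · have hk1 : k % 2 = 1 := by omega
      have hki : ¬((k : Int) % 2 = 0) := by omega
      simp [findVal, hdiv, hmod, hk1, hki]
      ring
  · rw [if_neg h1]
    by_cases h2 : 1 ≤ num ∧ num ≤ (k : Int) * (W : Int)
    · rw [if_pos h2, if_pos (show 1 ≤ num ∧ num ≤ ((k : Int) + 1) * (W : Int) by
        exact ⟨h2.1, by linarith [h2.2]⟩)]
    · rw [if_neg h2, if_neg (show ¬(1 ≤ num ∧ num ≤ ((k : Int) + 1) * (W : Int)) by
        rw [ht]
        push Not at h1 h2
        rintro ⟨ha, hb⟩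
        have h3 := h2 ha
        have h4 := h1 (by linarith)
        linarith)]

theorem outer_fold (num : Int) (W : Nat) (hW : 1 ≤ W) (k : Nat) :
    (PySem.List.pyRange 0 (k : Int) 1).foldl (solutionOuterStep num (W : Int)) ([], [], 1, false)
    = ((List.range k).map (storedRow (W : Int)),
       if 1 ≤ num ∧ num ≤ (k : Int) * (W : Int) then findVal (W : Int) num else [],
       (k : Int) * (W : Int) + 1,
       decide (k % 2 = 1)) := by
  induction k with
  | zero =>
      have h0 : ¬(1 ≤ num ∧ num ≤ ((0 : Nat) : Int) * (W : Int)) := by push_cast; omega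
      rw [PySem.List.pyRange_one_eq_nil (by simp), if_neg h0]
      simp
  | succ k ih =>
      have hc : ((k + 1 : Nat) : Int) = (k : Int) + 1 := by push_cast; ring
      rw [hc, PySem.List.pyRange_one_succ_right (by positivity), List.foldl_append, ih]
      simp only [List.foldl_cons, List.foldl_nil, solutionOuterStep]
      rw [inner_fold]
      simp only [List.nil_append]
      by_cases hk : k % 2 = 0
      · have hd : decide (k % 2 = 1) = false := by simp [hk]
        have hd1 : (k + 1) % 2 = 1 := by omega
        rw [hd]
        simp only [Bool.false_eq_true, if_false, Prod.mk.injEq]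
        refine ⟨?_, ?_, by ring, by simp [hd1]⟩
        · rw [List.range_succ, List.map_append]
          simp [storedRow, hk, rowVals_eq, List.map_map, pv_flatMap_singleton]
        · have hf := find_step num W k hW
          rw [hd] at hf
          simp only [Bool.false_eq_true, if_false] at hf
          exact hf
      · have hk1 : k % 2 = 1 := by omega
        have hd : decide (k % 2 = 1) = true := by simp [hk1]
        have hd1 : (k + 1) % 2 = 0 := by omega
        rw [hd]
        simp only [if_true, Prod.mk.injEq]
        rw [PySem.List.slice?_none_none_neg_one]
        refine ⟨?_, ?_, by ring, by simp [hd1]⟩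
        · rw [List.range_succ, List.map_append]
          simp [storedRow, hk1, rowVals_eq, List.map_map, pv_flatMap_singleton]
        · have hf := find_step num W k hW
          rw [hd] at hf
          simp only [if_true] at hf
          exact hf

theorem storedRow_get (W r : Nat) (c : Int) (h0 : 0 ≤ c) (h1 : c < (W : Int)) :
    PySem.List.pyGetD (storedRow (W : Int) r) c 0
    = (r : Int) * (W : Int) + 1 + (if r % 2 = 0 then c else (W : Int) - 1 - c) := by
  unfold storedRow rowVals
  by_cases hr : r % 2 = 0
  · rw [if_pos hr, if_pos hr, PySem.List.pyGetD_map_pyRange_of_nonneg _ _ _ _ h0 h1]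
  · rw [if_neg hr, if_neg hr]
    have hlen : ((PySem.List.pyRange 0 (W : Int) 1).map
        (fun j => (r : Int) * (W : Int) + 1 + j)).reverse.length = W := by
      simp [PySem.List.length_pyRange_one]
    rw [PySem.List.pyGetD_eq_getElem _ 0 h0 (by rw [hlen]; exact h1)]
    rw [List.getElem_reverse]
    rw [List.getElem_map]
    rw [PySem.List.getElem_pyRange_one]
    have h2 : ((((PySem.List.pyRange 0 (W : Int) 1).map
        (fun j => (r : Int) * (W : Int) + 1 + j)).length - 1 - c.toNat : Nat) : Int)
        = (W : Int) - 1 - c := by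
      simp [PySem.List.length_pyRange_one]
      omega
    rw [h2]
    ring

theorem solution_spec : Claim_equal_solution := by
  intro n w num _hdom hpre
  unfold Spec_solution
  obtain ⟨hw, hn, hnum1, hnum2⟩ := hpre
  obtain ⟨W, rfl⟩ : ∃ W : Nat, w = (W : Int) := ⟨w.toNat, (Int.toNat_of_nonneg (by omega)).symm⟩
  have hW : 1 ≤ W := by exact_mod_cast hw
  have hWpos : (0 : Int) < (W : Int) := by exact_mod_cast hW
  set F : Int := (n + (W : Int) - 1) / (W : Int) with hFdef
  have hem := Int.mul_ediv_add_emod (n + (W : Int) - 1) (W : Int)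
  have hr0 : 0 ≤ (n + (W : Int) - 1) % (W : Int) := Int.emod_nonneg _ (by omega)
  have hr1 : (n + (W : Int) - 1) % (W : Int) < (W : Int) := Int.emod_lt_of_pos _ hWpos
  have hnF : n ≤ F * (W : Int) := by nlinarith [hem]
  have hnF' : (F - 1) * (W : Int) < n := by nlinarith [hem]
  have hF1 : 1 ≤ F := by nlinarith [hnF, hn, hWpos]
  have hfloorA : (if (PySem.Int.mod n (W : Int) == 0) = true then PySem.Int.floordiv n (W : Int)
      else PySem.Int.floordiv n (W : Int) + 1) = F := by
    rw [PySem.Int.mod_eq_emod_of_pos hWpos, PySem.Int.floordiv_eq_ediv_of_pos hWpos]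
    have hem2 := Int.mul_ediv_add_emod n (W : Int)
    have hs0 : 0 ≤ n % (W : Int) := Int.emod_nonneg _ (by omega)
    have hs1 : n % (W : Int) < (W : Int) := Int.emod_lt_of_pos _ hWpos
    by_cases hr : n % (W : Int) = 0
    · rw [if_pos (by simpa using hr)]
      exact (pv_ediv_eq _ _ (n / (W : Int)) ((W : Int) - 1) (by omega) (by omega)
        (by rw [hr] at hem2; linarith)).symm
    · rw [if_neg (by simpa using hr)]
      exact (pv_ediv_eq _ _ (n / (W : Int) + 1) (n % (W : Int) - 1) (by omega) (by omega)
        (by linarith)).symm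
  have hfloorB : -(PySem.Int.floordiv (-n) (W : Int)) = F :=
    (PySem.Int.neg_floordiv_neg_eq_iff_of_pos hWpos).mpr ⟨hnF', hnF⟩
  set k : Nat := F.toNat with hkdef
  have hkF : (k : Int) = F := Int.toNat_of_nonneg (by omega)
  have hk1 : 1 ≤ k := by omega
  set rowI : Int := (num - 1) / (W : Int) with hrowdef
  set m0 : Int := (num - 1) % (W : Int) with hmdef
  have hem3 := Int.mul_ediv_add_emod (num - 1) (W : Int)
  have hm0 : 0 ≤ m0 := Int.emod_nonneg _ (by omega)
  have hm1 : m0 < (W : Int) := Int.emod_lt_of_pos _ hWpos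
  have hrow0 : 0 ≤ rowI := Int.ediv_nonneg (by omega) (by omega)
  have hrowF : rowI < F := by nlinarith [hem3, hnum2]
  simp only [solution, solution_alt]
  rw [if_neg (show ¬(n < 1 ∨ (W : Int) < 1) by omega)]
  rw [hfloorA, hfloorB, ← hkF, outer_fold num W hW k]
  rw [if_pos (show 1 ≤ num ∧ num ≤ (k : Int) * (W : Int) from
    ⟨hnum1, by rw [hkF, mul_comm]; exact hnum2⟩)]
  dsimp only
  simp only [findVal, beq_iff_eq, ← hrowdef, ← hmdef,
    PySem.Int.floordiv_eq_ediv_of_pos hWpos, PySem.Int.mod_eq_emod_of_pos hWpos,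
    PySem.Int.mod_eq_emod_of_pos (show (0:Int) < 2 by norm_num)]
  rw [PySem.List.pyGetD_zero_cons, PySem.List.pyGetD_ofNat']
  simp only [List.getD_cons_succ, List.getD_cons_zero]
  rw [show (k : Int) - 1 = ((k - 1 : Nat) : Int) by omega, PySem.List.pyGetD_natCast]
  rw [show (List.map (storedRow ((W : Nat) : Int)) (List.range k)).getD (k - 1) [] = storedRow (W : Int) (k - 1) from by
    rw [List.getD_eq_getElem?_getD, List.getElem?_map, List.getElem?_range (by omega : k - 1 < k)]
    rfl]
  set c : Int := if rowI % 2 = 0 then m0 else (W : Int) - 1 - m0 with hcdef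
  have hc0 : 0 ≤ c := by rw [hcdef]; split_ifs <;> omega
  have hc1 : c < (W : Int) := by rw [hcdef]; split_ifs <;> omega
  rw [storedRow_get W (k - 1) c hc0 hc1]
  have hpar : ((k - 1) % 2 = 0) ↔ (((k - 1 : Nat) : Int) % 2 = 0) := by omega
  by_cases hp : (k - 1) % 2 = 0
  · rw [if_pos hp, if_pos (hpar.mp hp)]
    rw [show ((k - 1 : Nat) : Int) * (W : Int) + 1 + c = ((k - 1 : Nat) : Int) * (W : Int) + c + 1 by ring]
  · rw [if_neg hp, if_neg (fun h => hp (hpar.mpr h))]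
    rw [show ((k - 1 : Nat) : Int) * (W : Int) + 1 + ((W : Int) - 1 - c)
        = ((k - 1 : Nat) : Int) * (W : Int) + ((W : Int) - 1 - c) + 1 by ring]
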